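-- pv_equiv track=rewrite | github.com/nhubavenski/advent-of-code-2023 | day_1.py | replace_first_word
-- ===== SOURCE A (Python) =====
-- def replace_first_word(string, word_dict):
--     for i in range(len(string)):
--         if string[i].isdigit():  # if a digit is present before a word is found - no need to replace
--             return string
--
--         for key in word_dict.keys():
--             if string.startswith(key, i):  # returns first index of found word
--                 string = string.replace(key, word_dict[key], 1) # replace first occurrence only
--                 return string
--     return string
-- ===== SOURCE B (Python) =====
-- import re
--
-- def replace_first_word(string, word_dict):
--     if not word_dict:
--         return string
--     # first digit position (len(string) if none)
--     d = next((i for i, c in enumerate(string) if c.isdigit()), len(string))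
--     # leftmost word match via one regex alternation in dict order
--     m = re.search("|".join(re.escape(k) for k in word_dict), string)
--     if m is None or d <= m.start():
--         return string
--     k = m.group()
--     return string[:m.start()] + word_dict[k] + string[m.start() + len(k):]
-- ===== Notes on version B (the rewrite author's own statement) =====
-- stated objective: alternative
-- what changed: A interleaves a digit test and a per-key startswith scan at every index and calls replace inside the loop; B computes the first-digit index and the leftmost match of a single regex alternation separately, compares the two positions once, and splices the replacement in by slicing.
import Mathlib
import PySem

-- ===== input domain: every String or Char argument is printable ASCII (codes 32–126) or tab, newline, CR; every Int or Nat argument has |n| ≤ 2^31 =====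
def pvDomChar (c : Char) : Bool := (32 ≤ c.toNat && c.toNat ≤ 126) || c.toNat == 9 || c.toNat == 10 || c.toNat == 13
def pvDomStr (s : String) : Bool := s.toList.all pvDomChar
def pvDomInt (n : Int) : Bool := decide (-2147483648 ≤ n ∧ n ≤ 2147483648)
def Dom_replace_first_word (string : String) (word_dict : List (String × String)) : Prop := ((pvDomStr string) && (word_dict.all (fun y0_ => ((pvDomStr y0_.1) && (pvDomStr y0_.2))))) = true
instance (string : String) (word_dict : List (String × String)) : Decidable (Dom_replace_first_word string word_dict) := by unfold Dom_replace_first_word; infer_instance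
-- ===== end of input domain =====

-- B replaces A's interleaved per-index scan (digit test then key loop at every position) by
-- computing the first-digit index and the leftmost regex-alternation match separately and
-- comparing the two positions once (objective: alternative).

-- ===== PORT A =====
-- string.replace(key, val, 1): replace the first occurrence only (hand port; exact:
-- '' is found at index 0, so ''.replace-first prepends, as in Python)
def pyReplace1 (s old new : List Char) : List Char :=
  let f := PySem.Chars.find s old
  if f = -1 then s else s.take f.toNat ++ new ++ s.drop (f.toNat + old.length)

-- the inner 'for key in word_dict.keys(): …' loop
def rfwInner (s : List Char) (d : PySem.Dict String String) (keys : List String) (i : Nat) :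
    Option (List Char) :=
  match keys with
  | [] => none
  | k :: rest =>
    -- string.startswith(key, i) with 0 ≤ i ≤ len(s)
    if PySem.Chars.startswith (s.drop i) k.toList then
      -- word_dict[key]: key comes from word_dict.keys(), so it is present; getD is exact here
      some (pyReplace1 s k.toList (PySem.Dict.getD d k "").toList)
    else rfwInner s d rest i

-- the outer 'for i in range(len(string))' loop; fuel = len(string) - i
def rfwGo (s : List Char) (d : PySem.Dict String String) (i fuel : Nat) : List Char :=
  match fuel with
  | 0 => s
  | fuel + 1 =>
    -- string[i].isdigit(); here i < len(s), so getD is exact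
    if PySem.Chars.isdigit (s.getD i ' ') then s
    else
      match rfwInner s d (PySem.Dict.keys d) i with
      | some r => r
      | none => rfwGo s d (i + 1) fuel

def replace_first_word (string : String) (word_dict : List (String × String)) : String :=
  String.ofList (rfwGo string.toList (PySem.Dict.ofList word_dict) 0 string.toList.length)

-- ===== PORT B =====
-- next((i for i, c in enumerate(string) if c.isdigit()), len(string))
def firstDigitIdx : List Char → Nat
  | [] => 0
  | c :: rest => if PySem.Chars.isdigit c then 0 else firstDigitIdx rest + 1

-- re.search("|".join(escaped keys), string): the regex engine tries positions left to
-- right and at each position the alternatives in pattern (= dict) order; contract of the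
-- literal alternation, ported step for step
def reFindAt (s : List Char) (keys : List String) (j : Nat) : Option String :=
  keys.find? (fun k => PySem.Chars.startswith (s.drop j) k.toList)

def reSearchGo (s : List Char) (keys : List String) (j fuel : Nat) : Option (Nat × String) :=
  match fuel with
  | 0 => none
  | fuel + 1 =>
    match reFindAt s keys j with
    | some k => some (j, k)
    | none => reSearchGo s keys (j + 1) fuel

def replace_first_word_alt (string : String) (word_dict : List (String × String)) : String :=
  if word_dict.isEmpty then string
  else
    match reSearchGo string.toList (PySem.Dict.keys (PySem.Dict.ofList word_dict)) 0
        (string.toList.length + 1) with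
    | none => string
    | some (j, k) =>
      if firstDigitIdx string.toList ≤ j then string
      else String.ofList (string.toList.take j
        ++ (PySem.Dict.getD (PySem.Dict.ofList word_dict) k "").toList
        ++ string.toList.drop (j + k.toList.length))

-- ===== PRECONDITION & SPEC =====
def Spec_replace_first_word (string : String) (word_dict : List (String × String)) (out : String) : Prop := out = replace_first_word_alt string word_dict
instance (string : String) (word_dict : List (String × String)) (out : String) : Decidable (Spec_replace_first_word string word_dict out) := by unfold Spec_replace_first_word; infer_instance

-- ===== CLAIM (what is proved, stated in full; the proofs are below) =====
def Claim_equal_replace_first_word : Prop := ∀ (string : String) (word_dict : List (String × String)), Dom_replace_first_word string word_dict → Spec_replace_first_word string word_dict (replace_first_word string word_dict)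

-- ===== LEMMAS AND PROOFS =====

theorem fdi_le_length (s : List Char) : firstDigitIdx s ≤ s.length := by
  induction s with
  | nil => simp [firstDigitIdx]
  | cons c rest ih =>
    simp only [firstDigitIdx, List.length_cons]
    split <;> omega

theorem fdi_le_of_digit (s : List Char) (i : Nat)
    (h : PySem.Chars.isdigit (s.getD i ' ') = true) : firstDigitIdx s ≤ i := by
  induction s generalizing i with
  | nil => simp [PySem.Chars.isdigit] at h
  | cons c rest ih =>
    cases i with
    | zero => simp_all [firstDigitIdx]
    | succ i =>
      simp only [firstDigitIdx]
      split
      · omega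
      · have := ih i (by simpa using h)
        omega

theorem le_fdi (s : List Char) (j : Nat)
    (h : ∀ p, p < j → PySem.Chars.isdigit (s.getD p ' ') = false)
    (hj : j ≤ s.length) : j ≤ firstDigitIdx s := by
  induction s generalizing j with
  | nil => simp at hj; omega
  | cons c rest ih =>
    cases j with
    | zero => omega
    | succ j =>
      have h0 : PySem.Chars.isdigit c = false := by simpa using h 0 (by omega)
      have hrest := ih j (fun p hp => by simpa using h (p + 1) (by omega)) (by simpa using hj)
      simp [firstDigitIdx, h0]
      omega

theorem rs_ge (s : List Char) (keys : List String) (a fuel j : Nat) (k : String)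
    (h : reSearchGo s keys a fuel = some (j, k)) : a ≤ j := by
  induction fuel generalizing a with
  | zero => simp [reSearchGo] at h
  | succ fuel ih =>
    simp only [reSearchGo] at h
    cases hf : reFindAt s keys a with
    | some k' => rw [hf] at h; simp at h; omega
    | none => rw [hf] at h; have := ih (a + 1) h; omega

theorem rs_skip (s : List Char) (keys : List String) (a i fuel : Nat)
    (h : ∀ p, a ≤ p → p < a + i → reFindAt s keys p = none) :
    reSearchGo s keys a (i + fuel) = reSearchGo s keys (a + i) fuel := by
  induction i generalizing a with
  | zero => simp
  | succ i ih =>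
    have h0 : reFindAt s keys a = none := h a (le_refl a) (by omega)
    have he : i + 1 + fuel = (i + fuel) + 1 := by omega
    rw [he]
    simp only [reSearchGo, h0]
    rw [ih (a + 1) (fun p hp1 hp2 => h p (by omega) (by omega))]
    congr 1
    omega

theorem rfwInner_eq (s : List Char) (d : PySem.Dict String String) (keys : List String) (i : Nat) :
    rfwInner s d keys i =
      (reFindAt s keys i).map (fun k => pyReplace1 s k.toList (PySem.Dict.getD d k "").toList) := by
  induction keys with
  | nil => simp [rfwInner, reFindAt]
  | cons k rest ih =>
    simp only [rfwInner, reFindAt, List.find?]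
    split
    · rename_i hsw
      rw [hsw]
      simp
    · rename_i hsw
      rw [Bool.not_eq_true] at hsw
      rw [hsw]
      simpa [reFindAt] using ih

theorem find_eq_of_first (s sub : List Char) (i : Nat)
    (occ : sub <+: s.drop i) (hmin : ∀ p, p < i → ¬ sub <+: s.drop p) :
    PySem.Chars.find s sub = (i : Int) := by
  have hin : PySem.Chars.isIn sub s = true :=
    (PySem.Chars.exists_prefix_drop_iff_isIn _ _).mp ⟨i, occ⟩
  have h0 : 0 ≤ PySem.Chars.find s sub :=
    (PySem.Chars.find_nonneg_iff _ _).mpr ((PySem.Chars.isIn_iff_infix _ _).mp hin)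
  obtain ⟨hpre, hmin'⟩ := PySem.Chars.find_spec h0
  have h1 : (PySem.Chars.find s sub).toNat ≤ i := by
    by_contra hlt
    exact hmin' i (by omega) occ
  have h2 : i ≤ (PySem.Chars.find s sub).toNat := by
    by_contra hlt
    exact hmin (PySem.Chars.find s sub).toNat (by omega) hpre
  omega

-- the value B computes from the two positions, as a function of the char list
def bCombine (s : List Char) (d : PySem.Dict String String) : List Char :=
  match reSearchGo s (PySem.Dict.keys d) 0 (s.length + 1) with
  | none => s
  | some (j, k) =>
    if firstDigitIdx s ≤ j then s
    else s.take j ++ (PySem.Dict.getD d k "").toList ++ s.drop (j + k.toList.length)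

theorem main_lemma (s : List Char) (d : PySem.Dict String String) (fuel i : Nat)
    (hf : i + fuel = s.length)
    (hd : ∀ p, p < i → PySem.Chars.isdigit (s.getD p ' ') = false)
    (hm : ∀ p, p < i → reFindAt s (PySem.Dict.keys d) p = none) :
    rfwGo s d i fuel = bCombine s d := by
  induction fuel generalizing i with
  | zero =>
    -- i = len(s): A returns s; B's search can only match an empty key at position len
    simp only [rfwGo, bCombine]
    have hsk : reSearchGo s (PySem.Dict.keys d) 0 (s.length + 1)
        = reSearchGo s (PySem.Dict.keys d) i 1 := by
      have h1 : s.length + 1 = i + 1 := by omega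
      rw [h1]
      simpa using rs_skip s (PySem.Dict.keys d) 0 i 1 (fun p _ hp => hm p (by omega))
    rw [hsk]
    simp only [reSearchGo]
    cases hfa : reFindAt s (PySem.Dict.keys d) i with
    | none => rfl
    | some k =>
      have hle : firstDigitIdx s ≤ i := by
        have := fdi_le_length s
        omega
      simp [hle]
  | succ fuel ih =>
    have hsk : reSearchGo s (PySem.Dict.keys d) 0 (s.length + 1)
        = reSearchGo s (PySem.Dict.keys d) i (fuel + 2) := by
      have h1 : s.length + 1 = i + (fuel + 2) := by omega
      rw [h1]
      simpa using rs_skip s (PySem.Dict.keys d) 0 i (fuel + 2) (fun p _ hp => hm p (by omega))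
    simp only [rfwGo]
    by_cases hdig : PySem.Chars.isdigit (s.getD i ' ') = true
    · -- a digit at i comes first: both sides return s unchanged
      rw [if_pos hdig]
      have hfd : firstDigitIdx s ≤ i := fdi_le_of_digit s i hdig
      cases hsr : reSearchGo s (PySem.Dict.keys d) 0 (s.length + 1) with
      | none => simp [bCombine, hsr]
      | some jk =>
        obtain ⟨j, k⟩ := jk
        have hij : i ≤ j := rs_ge s (PySem.Dict.keys d) i (fuel + 2) j k (by rw [← hsk, hsr])
        simp only [bCombine, hsr]
        rw [if_pos (by omega)]
    · rw [if_neg hdig]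
      rw [rfwInner_eq]
      cases hfa : reFindAt s (PySem.Dict.keys d) i with
      | some k =>
        -- first match is at position i: B splices there, A replaces the first occurrence of k
        simp only [Option.map_some]
        have hsr : reSearchGo s (PySem.Dict.keys d) 0 (s.length + 1) = some (i, k) := by
          rw [hsk]; simp [reSearchGo, hfa]
        have hfdi : ¬ firstDigitIdx s ≤ i := by
          have hstep : i + 1 ≤ firstDigitIdx s := by
            apply le_fdi s (i + 1)
            · intro p hp
              rcases Nat.lt_succ_iff_lt_or_eq.mp hp with h | h
              · exact hd p h
              · subst h; simpa using hdig
            · omega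
          omega
        simp only [bCombine, hsr, if_neg hfdi]
        have hkmem : k ∈ PySem.Dict.keys d := List.mem_of_find?_eq_some hfa
        have hfa' : List.find? (fun k => PySem.Chars.startswith (s.drop i) k.toList)
            (PySem.Dict.keys d) = some k := hfa
        have hps : (fun k : String => PySem.Chars.startswith (s.drop i) k.toList) k = true :=
          List.find?_some (p := fun k : String => PySem.Chars.startswith (s.drop i) k.toList)
            (a := k) (l := PySem.Dict.keys d) hfa'
        have hpre : k.toList <+: s.drop i := (PySem.Chars.startswith_iff _ _).mp hps
        have hmin : ∀ p, p < i → ¬ k.toList <+: s.drop p := by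
          intro p hp hc
          exact absurd ((PySem.Chars.startswith_iff _ _).mpr hc)
            (by simpa using List.find?_eq_none.mp (hm p hp) k hkmem)
        have hfind := find_eq_of_first s k.toList i hpre hmin
        simp only [pyReplace1, hfind]
        rw [if_neg (by omega)]
        simp
      | none =>
        simp only [Option.map_none]
        exact ih (i + 1) (by omega)
          (fun p hp => by
            rcases Nat.lt_succ_iff_lt_or_eq.mp hp with h | h
            · exact hd p h
            · subst h; simpa using hdig)
          (fun p hp => by
            rcases Nat.lt_succ_iff_lt_or_eq.mp hp with h | h
            · exact hm p h
            · subst h; exact hfa)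

theorem rs_all_none (s : List Char) (keys : List String)
    (h : ∀ p, reFindAt s keys p = none) (j fuel : Nat) :
    reSearchGo s keys j fuel = none := by
  induction fuel generalizing j with
  | zero => rfl
  | succ fuel ih => simp [reSearchGo, h j, ih]

-- ===== VERDICT (by name: the statement is the Claim_ definition above) =====
theorem replace_first_word_spec : Claim_equal_replace_first_word := by
  intro string word_dict _
  unfold Spec_replace_first_word
  unfold replace_first_word replace_first_word_alt
  have hmain := main_lemma string.toList (PySem.Dict.ofList word_dict) string.toList.length 0
    (by omega) (by omega) (by omega)
  rw [hmain]
  by_cases hemp : word_dict.isEmpty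
  · -- empty dict: no key ever matches, both sides are the original string
    rw [if_pos hemp]
    have hkeys : PySem.Dict.keys (PySem.Dict.ofList word_dict) = [] := by
      rw [List.isEmpty_iff.mp hemp]
      rfl
    have hn : ∀ p,
        reFindAt string.toList (PySem.Dict.keys (PySem.Dict.ofList word_dict)) p = none := by
      intro p
      simp [reFindAt, hkeys]
    simp [bCombine, rs_all_none _ _ hn]
  · rw [if_neg hemp]
    cases hsr : reSearchGo string.toList (PySem.Dict.keys (PySem.Dict.ofList word_dict)) 0
        (string.toList.length + 1) with
    | none =>
      simp only [bCombine, hsr]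
      simp
    | some jk =>
      obtain ⟨j, k⟩ := jk
      simp only [bCombine, hsr]
      by_cases hc : firstDigitIdx string.toList ≤ j
      · rw [if_pos hc, if_pos hc]
        simp
      · rw [if_neg hc, if_neg hc]
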